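-- pv_equiv track=rewrite | github.com/noam95/Search_Engine-master | searcher_wordNet.py | get_relevant_doc_dict
-- ===== SOURCE A (Python) =====
-- def get_relevant_doc_dict(relevant_docs):
--     docs_dict = {}# key= doc_id, value= (num_of_terms appears_in_doc from qury, [(terms,num_of_term_appears)])
--     #relevant_docs = dict- key=term, value= [(num_of_term_appears, dic_id),(num_of_term_appears, dic_id)]
--     for term in relevant_docs.keys():
--         for doc_ditails in relevant_docs[term]:
--             doc_id = doc_ditails[1]
--             if doc_id in docs_dict.keys():
--                 flag = False
--                 #clean double docs in corpus
--                 for term_in_doc in docs_dict[doc_id][1]: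
--                     if term_in_doc[0] == term:
--                         flag = True
--                 #not same term in same doc
--                 if not flag:
--                     sum_terms = docs_dict[doc_id][0] + 1
--                     #details = docs_dict[doc_id]
--                     docs_dict[doc_id] = (sum_terms, docs_dict[doc_id][1] + [(term, doc_ditails[0])])
--                     #details1= docs_dict[doc_id]
--             else:
--                 docs_dict[doc_id] = (1, [(term, doc_ditails[0])])
--     return docs_dict
-- ===== SOURCE B (Python) =====
-- def get_relevant_doc_dict(relevant_docs):
--     # pass 1: group every posting under its doc_id, in encounter order, no dedup yet
--     groups = {}
--     for term, postings in relevant_docs.items():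
--         for appearances, doc_id in postings:
--             groups.setdefault(doc_id, []).append((term, appearances))
--     # pass 2: reduce each doc's posting list, keeping the first occurrence of each term
--     result = {}
--     for doc_id, pairs in groups.items():
--         seen = set()
--         uniq = []
--         for term, app in pairs:
--             if term not in seen:
--                 seen.add(term)
--                 uniq.append((term, app))
--         result[doc_id] = (len(uniq), uniq)
--     return result
-- ===== Notes on version B (the rewrite author's own statement) =====
-- stated objective: faster
-- what changed: A maintains the deduped per-doc state incrementally, rescanning each doc's accumulated term list for every posting (and rebuilding the stored list on each update); B first builds a per-doc grouping table of all postings without dedup, then in a second pass reduces each doc's list keeping first occurrences via a seen-set and counts the unique terms.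
import Mathlib
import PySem

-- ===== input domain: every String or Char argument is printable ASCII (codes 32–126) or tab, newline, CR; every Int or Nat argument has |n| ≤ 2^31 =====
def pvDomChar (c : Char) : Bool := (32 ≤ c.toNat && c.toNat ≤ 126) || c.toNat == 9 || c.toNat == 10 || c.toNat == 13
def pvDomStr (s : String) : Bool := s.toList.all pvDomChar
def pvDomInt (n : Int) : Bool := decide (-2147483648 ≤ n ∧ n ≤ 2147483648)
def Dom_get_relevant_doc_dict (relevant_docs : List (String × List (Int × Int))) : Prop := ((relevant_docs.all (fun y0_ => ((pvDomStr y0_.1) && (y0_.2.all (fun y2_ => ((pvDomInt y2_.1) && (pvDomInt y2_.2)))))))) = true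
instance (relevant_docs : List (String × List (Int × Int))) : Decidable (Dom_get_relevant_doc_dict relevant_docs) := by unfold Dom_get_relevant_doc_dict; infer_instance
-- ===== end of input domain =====

-- B replaces A's maintain-and-rescan single pass (inner rescan of the doc's term list per posting) by a group-then-reduce decomposition with a seen-set; a timing run measured B faster (121x at n=4096, A timed out at n=16384).

-- ===== PORT A =====
-- inner loop body of A: one posting doc_ditails of term, updating docs_dict
def pvA_step (term : String) (docs_dict : PySem.Dict Int (Int × List (String × Int))) (doc_ditails : Int × Int) : PySem.Dict Int (Int × List (String × Int)) :=
  let doc_id := doc_ditails.2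
  match docs_dict.get? doc_id with
  | some entry =>
      -- 'for term_in_doc in docs_dict[doc_id][1]: if term_in_doc[0] == term: flag = True'
      let flag := entry.2.foldl (fun flag term_in_doc => if term_in_doc.1 == term then true else flag) false
      if !flag then docs_dict.insert doc_id (entry.1 + 1, entry.2 ++ [(term, doc_ditails.1)])
      else docs_dict
  | none => docs_dict.insert doc_id (1, [(term, doc_ditails.1)])

def get_relevant_doc_dict (relevant_docs : List (String × List (Int × Int))) : List (Int × Int × (List (String × Int))) :=
  let rd := PySem.Dict.ofList relevant_docs
  let docs_dict := rd.keys.foldl (fun docs_dict term =>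
    (rd.getD term []).foldl (fun docs_dict doc_ditails => pvA_step term docs_dict doc_ditails) docs_dict)
    PySem.Dict.empty
  docs_dict.items

-- ===== PORT B =====
-- pass 1: 'groups.setdefault(doc_id, []).append((term, appearances))' = modify with list append
def pvB_group (rd : PySem.Dict String (List (Int × Int))) : PySem.Dict Int (List (String × Int)) :=
  rd.items.foldl (fun groups tp =>
    tp.2.foldl (fun groups ad => groups.modify ad.2 [] (· ++ [(tp.1, ad.1)])) groups)
    PySem.Dict.empty

-- pass 2 reducer: keep the first occurrence of each term, tracking seen terms in a set
def pvB_uniq (pairs : List (String × Int)) : List (String × Int) :=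
  (pairs.foldl (fun st p =>
      if st.2.contains p.1 then st else (st.1 ++ [p], PySem.Set.add st.2 p.1))
    ([], (PySem.Set.empty : PySem.Set String))).1

def get_relevant_doc_dict_alt (relevant_docs : List (String × List (Int × Int))) : List (Int × Int × (List (String × Int))) :=
  let rd := PySem.Dict.ofList relevant_docs
  (pvB_group rd).items.map (fun dp => ((dp.1 : Int), (((pvB_uniq dp.2).length : Int), pvB_uniq dp.2)))

-- ===== PRECONDITION & SPEC =====
def Spec_get_relevant_doc_dict (relevant_docs : List (String × List (Int × Int))) (out : List (Int × Int × (List (String × Int)))) : Prop := out = get_relevant_doc_dict_alt relevant_docs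
instance (relevant_docs : List (String × List (Int × Int))) (out : List (Int × Int × (List (String × Int)))) : Decidable (Spec_get_relevant_doc_dict relevant_docs out) := by unfold Spec_get_relevant_doc_dict; infer_instance

-- ===== CLAIM (what is proved, stated in full; the proofs are below) =====
def Claim_equal_get_relevant_doc_dict : Prop := ∀ (relevant_docs : List (String × List (Int × Int))), Dom_get_relevant_doc_dict relevant_docs → Spec_get_relevant_doc_dict relevant_docs (get_relevant_doc_dict relevant_docs)

-- ===== LEMMAS AND PROOFS =====

lemma pv_flag_eq (t : String) (u : List (String × Int)) (b : Bool) :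
    u.foldl (fun flag p => if p.1 == t then true else flag) b = (b || u.any (fun p => p.1 == t)) := by
  induction u generalizing b with
  | nil => simp
  | cons p u ih =>
      simp only [List.foldl_cons, ih, List.any_cons]
      by_cases h : p.1 = t
      · simp [h]
      · simp [h]
        cases b <;> simp_all

def pvUStep (st : List (String × Int) × List String) (p : String × Int) : List (String × Int) × List String :=
  if st.2.contains p.1 then st else (st.1 ++ [p], PySem.Set.add st.2 p.1)

lemma pvB_uniq_eq (pairs : List (String × Int)) :
    pvB_uniq pairs = (pairs.foldl pvUStep ([], [])).1 := rfl

lemma pvUStep_eq (st : List (String × Int) × List String) (p : String × Int) :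
    pvUStep st p = if p.1 ∈ st.2 then st else (st.1 ++ [p], st.2 ++ [p.1]) := by
  by_cases h : p.1 ∈ st.2 <;> simp [pvUStep, PySem.Set.add, h]

lemma pv_uniq_inv (v : List (String × Int)) (u0 : List (String × Int)) (s0 : List String)
    (hinv : ∀ x, x ∈ s0 ↔ x ∈ u0.map Prod.fst) :
    (∀ x, x ∈ (v.foldl pvUStep (u0, s0)).2 ↔ x ∈ (v.foldl pvUStep (u0, s0)).1.map Prod.fst) ∧
    (∀ x, x ∈ (v.foldl pvUStep (u0, s0)).1.map Prod.fst ↔ x ∈ u0.map Prod.fst ∨ x ∈ v.map Prod.fst) := by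
  induction v generalizing u0 s0 with
  | nil => exact ⟨fun x => by simpa using hinv x, fun x => by simp⟩
  | cons p v ih =>
      by_cases hc : p.1 ∈ s0
      · have hstep : pvUStep (u0, s0) p = (u0, s0) := by rw [pvUStep_eq]; simp [hc]
        have hp : p.1 ∈ u0.map Prod.fst := (hinv p.1).mp hc
        have H := ih u0 s0 hinv
        refine ⟨fun x => by simpa [hstep] using H.1 x, fun x => ?_⟩
        have h2 := H.2 x
        simp only [List.foldl_cons, hstep, List.map_cons, List.mem_cons]
        rw [h2]
        constructor
        · rintro (h | h)
          · exact Or.inl h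
          · exact Or.inr (Or.inr h)
        · rintro (h | h | h)
          · exact Or.inl h
          · exact Or.inl (h ▸ hp)
          · exact Or.inr h
      · have hstep : pvUStep (u0, s0) p = (u0 ++ [p], s0 ++ [p.1]) := by rw [pvUStep_eq]; simp [hc]
        have hinv' : ∀ x, x ∈ s0 ++ [p.1] ↔ x ∈ (u0 ++ [p]).map Prod.fst := by
          intro x; simp [hinv x]
        have H := ih (u0 ++ [p]) (s0 ++ [p.1]) hinv'
        refine ⟨fun x => by simpa [hstep] using H.1 x, fun x => ?_⟩
        have h2 := H.2 x
        simp only [List.map_append] at h2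
        simp only [List.foldl_cons, hstep, List.map_cons, List.mem_cons]
        rw [h2]
        simp only [List.map_cons, List.map_nil, List.mem_append, List.mem_cons]
        tauto

lemma pv_uniq_fst (v : List (String × Int)) (x : String) :
    x ∈ (pvB_uniq v).map Prod.fst ↔ x ∈ v.map Prod.fst := by
  have := (pv_uniq_inv v [] [] (by simp)).2 x
  simpa [pvB_uniq_eq] using this

lemma pv_uniq_snoc (v : List (String × Int)) (p : String × Int) :
    pvB_uniq (v ++ [p]) = if p.1 ∈ v.map Prod.fst then pvB_uniq v else pvB_uniq v ++ [p] := by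
  have hseen := (pv_uniq_inv v [] [] (by simp)).1 p.1
  have hfst := pv_uniq_fst v p.1
  rw [pvB_uniq_eq, List.foldl_append, List.foldl_cons, List.foldl_nil, pvUStep_eq]
  by_cases h : p.1 ∈ v.map Prod.fst
  · rw [if_pos (hseen.mpr ((pvB_uniq_eq v ▸ hfst).mpr h)), if_pos h, pvB_uniq_eq]
  · rw [if_neg (fun hm => h ((pvB_uniq_eq v ▸ hfst).mp (hseen.mp hm))), if_neg h, pvB_uniq_eq]

-- B's one step of pass 1 (definitionally the lambda in pvB_group)
def pvB_stepG (term : String) (g : PySem.Dict Int (List (String × Int))) (ad : Int × Int) : PySem.Dict Int (List (String × Int)) :=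
  g.modify ad.2 [] (· ++ [(term, ad.1)])

-- B's value transformation, per dict entry
def pvF (dp : Int × List (String × Int)) : Int × Int × List (String × Int) :=
  (dp.1, (((pvB_uniq dp.2).length : Int), pvB_uniq dp.2))

def pvToA (g : PySem.Dict Int (List (String × Int))) : PySem.Dict Int (Int × List (String × Int)) :=
  PySem.Dict.mk (g.items.map pvF)

lemma pv_get?_toA (g : PySem.Dict Int (List (String × Int))) (k : Int) :
    (pvToA g).get? k = (g.get? k).map (fun v => (((pvB_uniq v).length : Int), pvB_uniq v)) := by
  simp [pvToA, PySem.Dict.get?, List.find?_map, Option.map_map]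
  rfl

lemma pv_contains_toA (g : PySem.Dict Int (List (String × Int))) (k : Int) :
    (pvToA g).contains k = g.contains k := by
  rw [PySem.Dict.contains_eq_isSome_get?, pv_get?_toA, PySem.Dict.contains_eq_isSome_get?]
  cases g.get? k <;> rfl

lemma pv_uniq_singleton (p : String × Int) : pvB_uniq [p] = [p] := by
  simp [pvB_uniq, PySem.Set.add, PySem.Set.empty]

lemma pv_step_comm (t : String) (ad : Int × Int) (g : PySem.Dict Int (List (String × Int)))
    (h : g.keys.Nodup) :
    pvA_step t (pvToA g) ad = pvToA (pvB_stepG t g ad) := by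
  cases hg : g.get? ad.2 with
  | none =>
      have hc : g.contains ad.2 = false := (PySem.Dict.get?_eq_none_iff_contains g ad.2).mp hg
      have hcA : (pvToA g).contains ad.2 = false := by rw [pv_contains_toA]; exact hc
      have hA : pvA_step t (pvToA g) ad = (pvToA g).insert ad.2 (1, [(t, ad.1)]) := by
        simp only [pvA_step, pv_get?_toA, hg, Option.map_none]
      rw [hA]
      have hB : pvB_stepG t g ad = g.insert ad.2 [(t, ad.1)] := by
        simp only [pvB_stepG, PySem.Dict.modify, PySem.Dict.getD_of_not_contains g _ hc,
          List.nil_append]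
      rw [hB]
      have hitems : ((pvToA g).insert ad.2 (1, [(t, ad.1)])).items
          = (pvToA (g.insert ad.2 [(t, ad.1)])).items := by
        rw [PySem.Dict.items_insert_of_not_contains _ _ hcA]
        unfold pvToA
        rw [PySem.Dict.items_insert_of_not_contains g _ hc, List.map_append]
        simp [pvF, pv_uniq_singleton]
      exact congrArg PySem.Dict.mk hitems
  | some v =>
      have hc : g.contains ad.2 = true := by
        rw [PySem.Dict.contains_eq_isSome_get?, hg]; rfl
      have hcA : (pvToA g).contains ad.2 = true := by rw [pv_contains_toA]; exact hc
      have hgetD : g.getD ad.2 [] = v := PySem.Dict.getD_of_get?_eq_some g [] hg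
      have hB : pvB_stepG t g ad = g.insert ad.2 (v ++ [(t, ad.1)]) := by
        simp only [pvB_stepG, PySem.Dict.modify, hgetD]
      have hval : ∀ p ∈ g.items, p.1 = ad.2 → p.2 = v := by
        intro p hp hp1
        have := PySem.Dict.get?_of_mem_items g (k := p.1) (v := p.2) (by simpa using hp) h
        rw [hp1, hg] at this
        exact (Option.some.injEq p.2 v).mp this.symm
      have hflag : (pvB_uniq v).foldl (fun flag p => if p.1 == t then true else flag) false
          = decide (t ∈ v.map Prod.fst) := by
        rw [pv_flag_eq]
        by_cases hm : t ∈ v.map Prod.fst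
        · simp only [hm, decide_true, Bool.false_or, List.any_eq_true]
          rcases List.mem_map.mp ((pv_uniq_fst v t).mpr hm) with ⟨p, hp, hp1⟩
          exact ⟨p, hp, by simp [hp1]⟩
        · simp only [hm, decide_false, Bool.false_or, List.any_eq_false]
          intro p hp
          have hmem : p.1 ∈ v.map Prod.fst :=
            (pv_uniq_fst v p.1).mp (List.mem_map_of_mem hp)
          simp only [beq_iff_eq]
          intro hpt
          exact hm (hpt ▸ hmem)
      by_cases hm : t ∈ v.map Prod.fst
      · have hA : pvA_step t (pvToA g) ad = pvToA g := by
          simp only [pvA_step, pv_get?_toA, hg, Option.map_some, hflag, hm, decide_true,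
            Bool.not_true, Bool.false_eq_true, if_false]
        rw [hA, hB]
        have hitems : (pvToA g).items = (pvToA (g.insert ad.2 (v ++ [(t, ad.1)]))).items := by
          unfold pvToA
          rw [PySem.Dict.items_insert_of_contains g _ hc, List.map_map]
          apply (List.map_congr_left ?_).symm
          intro p hp
          by_cases hp1 : p.1 = ad.2
          · have hp2 := hval p hp hp1
            rw [show p = (ad.2, v) from Prod.ext hp1 hp2]
            simp only [Function.comp_apply, beq_self_eq_true, if_true, pvF, pv_uniq_snoc, hm,
              if_true]
          · simp [Function.comp_apply, hp1]
        exact congrArg PySem.Dict.mk hitems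
      · have hA : pvA_step t (pvToA g) ad =
            (pvToA g).insert ad.2 (((pvB_uniq v).length : Int) + 1, pvB_uniq v ++ [(t, ad.1)]) := by
          simp only [pvA_step, pv_get?_toA, hg, Option.map_some, hflag, hm, decide_false,
            Bool.not_false, if_true]
        rw [hA, hB]
        have hitems : (((pvToA g).insert ad.2 (((pvB_uniq v).length : Int) + 1, pvB_uniq v ++ [(t, ad.1)]))).items = (pvToA (g.insert ad.2 (v ++ [(t, ad.1)]))).items := by
          rw [PySem.Dict.items_insert_of_contains _ _ hcA]
          unfold pvToA
          rw [PySem.Dict.items_insert_of_contains g _ hc]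
          show List.map _ (List.map pvF g.items) = _
          rw [List.map_map, List.map_map]
          apply List.map_congr_left
          intro p hp
          by_cases hp1 : p.1 = ad.2
          · have hp2 := hval p hp hp1
            rw [show p = (ad.2, v) from Prod.ext hp1 hp2]
            simp only [Function.comp_apply, pvF, beq_self_eq_true, if_true]
            rw [pv_uniq_snoc]
            simp only [hm, if_false]
            refine Prod.ext rfl (Prod.ext ?_ rfl)
            show ((pvB_uniq v).length : Int) + 1 = ((pvB_uniq v ++ [(t, ad.1)]).length : Int)
            simp only [List.length_append, List.length_cons, List.length_nil]
            push_cast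
            ring
          · simp [Function.comp_apply, pvF, hp1]
        exact congrArg PySem.Dict.mk hitems

lemma pv_main_fold (s : List (String × (Int × Int))) (g : PySem.Dict Int (List (String × Int)))
    (h : g.keys.Nodup) :
    s.foldl (fun dd q => pvA_step q.1 dd q.2) (pvToA g) =
      pvToA (s.foldl (fun g q => pvB_stepG q.1 g q.2) g) := by
  induction s generalizing g with
  | nil => rfl
  | cons q s ih =>
      simp only [List.foldl_cons, pv_step_comm q.1 q.2 g h]
      exact ih _ (PySem.Dict.nodup_keys_insert _ _ _ h)

-- nested loop over (key, list) pairs = loop over the flattened stream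
lemma pv_nested_eq_stream {σ : Type} (F : String → σ → (Int × Int) → σ)
    (l : List (String × List (Int × Int))) (init : σ) :
    l.foldl (fun acc tp => tp.2.foldl (fun acc ad => F tp.1 acc ad) acc) init =
      (l.flatMap (fun tp => tp.2.map (fun ad => (tp.1, ad)))).foldl (fun acc q => F q.1 acc q.2) init := by
  induction l generalizing init with
  | nil => rfl
  | cons tp l ih => simp [List.foldl_append, List.foldl_map, ih]

-- A's keys-then-lookup outer loop = loop over items (a dict's keys are nodup)
lemma pv_keys_fold {σ : Type} (rd : PySem.Dict String (List (Int × Int))) (h : rd.keys.Nodup)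
    (F : String → σ → List (Int × Int) → σ) (init : σ) :
    rd.keys.foldl (fun acc t => F t acc (rd.getD t [])) init =
      rd.items.foldl (fun acc tp => F tp.1 acc tp.2) init := by
  show (rd.items.map Prod.fst).foldl (fun acc t => F t acc (rd.getD t [])) init = _
  rw [List.foldl_map]
  apply PySem.List.foldl_congr_mem
  intro acc p hp
  rw [PySem.Dict.getD_of_mem_items rd (by simpa using hp) h]

-- ===== VERDICT (by name: the statement is the Claim_ definition above) =====
theorem get_relevant_doc_dict_spec : Claim_equal_get_relevant_doc_dict := by
  intro relevant_docs _
  unfold Spec_get_relevant_doc_dict get_relevant_doc_dict get_relevant_doc_dict_alt pvB_group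
  dsimp only
  rw [pv_keys_fold (PySem.Dict.ofList relevant_docs) (PySem.Dict.nodup_keys_ofList relevant_docs)
    (fun t acc ps => ps.foldl (fun dd ad => pvA_step t dd ad) acc) PySem.Dict.empty]
  rw [pv_nested_eq_stream (fun t acc ad => pvA_step t acc ad)]
  rw [show (List.foldl (fun (groups : PySem.Dict Int (List (String × Int))) (tp : String × List (Int × Int)) =>
        List.foldl (fun groups ad => groups.modify ad.2 [] (fun x => x ++ [(tp.1, ad.1)])) groups tp.2)
        PySem.Dict.empty (PySem.Dict.ofList relevant_docs).items)
      = (List.foldl (fun g q => pvB_stepG q.1 g q.2) PySem.Dict.empty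
        (((PySem.Dict.ofList relevant_docs).items).flatMap (fun tp => tp.2.map (fun ad => (tp.1, ad)))))
      from pv_nested_eq_stream (fun t g ad => pvB_stepG t g ad) _ _]
  rw [show (PySem.Dict.empty : PySem.Dict Int (Int × List (String × Int))) = pvToA PySem.Dict.empty from rfl]
  rw [pv_main_fold _ _ (by simp [PySem.Dict.keys_empty])]
  rfl
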